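-- pv_equiv track=rewrite | github.com/The64thGamer/cheeseepedia | scripts/cep_build_tag_search.py | build_pages_by_tag
-- ===== SOURCE A (Python) =====
-- from collections import defaultdict
--
-- def build_pages_by_tag(tags_by_page: dict, pages_meta: dict):
--     pages_by_tag = defaultdict(list)
--     for path, tags in tags_by_page.items():
--         for t in tags:
--             pages_by_tag[t].append({"path": path, "title": pages_meta[path]["title"]})
--     pages_by_tag_sorted = {}
--     for tag, arr in pages_by_tag.items():
--         seenp = set()
--         uniq = []
--         for o in arr:
--             if o["path"] in seenp:
--                 continue
--             seenp.add(o["path"])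
--             uniq.append(o)
--         uniq.sort(key=lambda x: (x["title"].lower(), x["path"]))
--         pages_by_tag_sorted[tag] = uniq
--     return pages_by_tag_sorted
-- ===== SOURCE B (Python) =====
-- def build_pages_by_tag(tags_by_page: dict, pages_meta: dict):
--     # Different strategy: flatten to (tag, path, title) records, sort ONCE globally
--     # by (title.lower(), path), then distribute into per-tag lists in a single pass
--     # with one global seen-set of (tag, path) pairs; no per-tag sort or per-tag dedup
--     # pass exists.  Stability of the global sort makes each per-tag list sorted.
--     flat = []
--     for path, tags in tags_by_page.items():
--         for t in tags:
--             flat.append((t, path, pages_meta[path]["title"]))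
--     result = {t: [] for t, _, _ in flat}
--     flat.sort(key=lambda r: (r[2].lower(), r[1]))
--     seen = set()
--     for t, path, title in flat:
--         if (t, path) not in seen:
--             seen.add((t, path))
--             result[t].append({"path": path, "title": title})
--     return result
-- ===== Notes on version B (the rewrite author's own statement) =====
-- stated objective: alternative
-- what changed: A groups pages into per-tag lists, then for each tag runs a seen-set dedup pass and sorts that tag's list; B instead flattens everything to (tag, path, title) records, sorts ONCE globally by (title.lower(), path), and distributes the sorted records into per-tag lists in a single pass with one global seen-set of (tag, path) pairs, relying on stability of the global sort to make every per-tag list sorted.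
import Mathlib
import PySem

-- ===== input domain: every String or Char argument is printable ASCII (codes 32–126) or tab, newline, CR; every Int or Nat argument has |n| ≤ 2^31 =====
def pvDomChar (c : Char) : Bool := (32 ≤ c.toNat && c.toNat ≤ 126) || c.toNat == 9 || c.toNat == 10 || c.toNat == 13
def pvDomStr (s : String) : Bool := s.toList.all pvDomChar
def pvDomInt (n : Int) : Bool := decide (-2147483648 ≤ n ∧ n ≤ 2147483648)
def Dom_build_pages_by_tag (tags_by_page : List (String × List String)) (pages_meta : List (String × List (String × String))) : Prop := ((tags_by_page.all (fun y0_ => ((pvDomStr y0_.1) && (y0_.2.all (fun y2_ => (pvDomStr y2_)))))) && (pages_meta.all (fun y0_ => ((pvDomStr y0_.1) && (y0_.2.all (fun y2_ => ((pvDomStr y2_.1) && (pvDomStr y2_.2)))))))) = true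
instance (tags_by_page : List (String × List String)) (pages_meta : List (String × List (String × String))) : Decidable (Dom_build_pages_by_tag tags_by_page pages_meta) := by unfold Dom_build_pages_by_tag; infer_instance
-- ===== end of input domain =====

-- B replaces A's group-then-per-tag-dedup-then-per-tag-sort by ONE global sort of the
-- flattened (tag, path, title) records followed by a single distributing pass with one
-- global seen-set; objective: alternative (same asymptotic cost, different algorithm).

-- ===== PORT A =====
-- shared helper: the Python parameters are dicts; the assoc-list arguments are viewed
-- through PySem.Dict exactly as Python builds a dict from them (last value wins, first position).
def pvMeta (pages_meta : List (String × List (String × String))) : PySem.Dict String (PySem.Dict String String) :=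
  PySem.Dict.ofList (pages_meta.map (fun q => (q.1, PySem.Dict.ofList q.2)))

-- pages_meta[path]["title"]; under Pre_ the lookups never miss, the "" defaults never fire
def pvTitle (pages_meta : List (String × List (String × String))) (p : String) : String :=
  ((pvMeta pages_meta).getD p PySem.Dict.empty).getD "title" ""

-- o[k] on the small page dicts the code itself builds (lookup cannot miss there)
def pvGetS (o : List (String × String)) (k : String) : String :=
  ((o.find? (fun q => q.1 == k)).map (fun q => q.2)).getD ""

-- the dict literal {"path": p, "title": f p}
def pvObj (f : String → String) (p : String) : List (String × String) := [("path", p), ("title", f p)]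

def build_pages_by_tag (tags_by_page : List (String × List String)) (pages_meta : List (String × List (String × String))) : List (String × List (List (String × String))) :=
  ((PySem.Dict.ofList tags_by_page).items.foldl
    (fun d pr => pr.2.foldl
      (fun d t => d.modify t [] (fun arr => arr ++ [pvObj (pvTitle pages_meta) pr.1])) d)
    PySem.Dict.empty).items.foldl
    (fun out tp =>
      out ++ [(tp.1,
        PySem.List.sorted2
          (tp.2.foldl
            (fun (st : PySem.Set String × List (List (String × String))) o =>
              if PySem.Set.contains st.1 (pvGetS o "path") = true then st
              else (PySem.Set.add st.1 (pvGetS o "path"), st.2 ++ [o]))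
            (PySem.Set.empty, [])).2
          (fun x => PySem.Str.lower (pvGetS x "title")) (fun x => pvGetS x "path"))])
    []

-- ===== PORT B =====
-- the dict literal {"path": r[1], "title": r[2]} built from a (tag, path, title) record
def pvObjR (r : String × String × String) : List (String × String) :=
  [("path", r.2.1), ("title", r.2.2)]

-- the body of B's single distributing loop: skip a (tag, path) pair already seen,
-- otherwise record it and append the page object to result[tag]
def pvStep (st : PySem.Set (String × String) × PySem.Dict String (List (List (String × String)))) (r : String × String × String) : PySem.Set (String × String) × PySem.Dict String (List (List (String × String))) :=
  if PySem.Set.contains st.1 (r.1, r.2.1) = true then st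
  else (PySem.Set.add st.1 (r.1, r.2.1), st.2.modify r.1 [] (fun arr => arr ++ [pvObjR r]))

def build_pages_by_tag_alt (tags_by_page : List (String × List String)) (pages_meta : List (String × List (String × String))) : List (String × List (List (String × String))) :=
  let flat : List (String × String × String) :=
    (PySem.Dict.ofList tags_by_page).items.foldl
      (fun fl pr => pr.2.foldl (fun fl t => fl ++ [(t, pr.1, pvTitle pages_meta pr.1)]) fl) []
  let result0 : PySem.Dict String (List (List (String × String))) :=
    flat.foldl (fun d r => d.insert r.1 []) PySem.Dict.empty
  ((PySem.List.sorted2 flat (fun r => PySem.Str.lower r.2.2) (fun r => r.2.1)).foldl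
    pvStep (PySem.Set.empty, result0)).2.items

-- ===== PRECONDITION & SPEC =====
-- Pre_ excludes exactly the inputs where the Python raises KeyError: some page with a
-- nonempty tag list whose path is missing from pages_meta or whose metadata lacks "title".
def Pre_build_pages_by_tag (tags_by_page : List (String × List String)) (pages_meta : List (String × List (String × String))) : Prop :=
  ∀ pr ∈ (PySem.Dict.ofList tags_by_page).items, pr.2 ≠ [] →
    ((pvMeta pages_meta).getD pr.1 PySem.Dict.empty).contains "title" = true
instance (tags_by_page : List (String × List String)) (pages_meta : List (String × List (String × String))) : Decidable (Pre_build_pages_by_tag tags_by_page pages_meta) := by unfold Pre_build_pages_by_tag; infer_instance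

def pvWitness_build_pages_by_tag : (List (String × List String)) × (List (String × List (String × String))) :=
  ([("a", ["x", "y"]), ("b", ["x"])], [("a", [("title", "T")]), ("b", [("title", "s")])])

def Spec_build_pages_by_tag (tags_by_page : List (String × List String)) (pages_meta : List (String × List (String × String))) (out : List (String × List (List (String × String)))) : Prop := out = build_pages_by_tag_alt tags_by_page pages_meta
instance (tags_by_page : List (String × List String)) (pages_meta : List (String × List (String × String))) (out : List (String × List (List (String × String)))) : Decidable (Spec_build_pages_by_tag tags_by_page pages_meta out) := by unfold Spec_build_pages_by_tag; infer_instance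

-- ===== CLAIM (what is proved, stated in full; the proofs are below) =====
def Claim_equal_build_pages_by_tag : Prop := ∀ (tags_by_page : List (String × List String)) (pages_meta : List (String × List (String × String))), Dom_build_pages_by_tag tags_by_page pages_meta → Pre_build_pages_by_tag tags_by_page pages_meta → Spec_build_pages_by_tag tags_by_page pages_meta (build_pages_by_tag tags_by_page pages_meta)

-- ===== LEMMAS AND PROOFS =====

-- ---- generic list/dict plumbing ----

theorem foldl_nested_pairs {α β δ : Type} (step : δ → α → β → δ) (l : List (α × List β)) (e : δ) :
    l.foldl (fun d pr => pr.2.foldl (fun d t => step d pr.1 t) d) e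
      = (l.flatMap (fun pr => pr.2.map (fun t => (pr.1, t)))).foldl (fun d pt => step d pt.1 pt.2) e := by
  induction l generalizing e with
  | nil => rfl
  | cons pr rest ih =>
    simp only [List.foldl_cons, List.flatMap_cons, List.foldl_append, ih, List.foldl_map]

theorem beq_str_comm (a b : String) : (a == b) = (b == a) := by
  by_cases h : a = b
  · simp [h]
  · simp [h, Ne.symm h]

theorem getD_foldl_modify_filter {α ν : Type} (key : α → String) (g : α → ν → ν) (d0 : ν)
    (l : List α) (d : PySem.Dict String ν) (c : String) :
    (l.foldl (fun d x => d.modify (key x) d0 (g x)) d).getD c d0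
      = (l.filter (fun x => key x == c)).foldl (fun v x => g x v) (d.getD c d0) := by
  induction l generalizing d with
  | nil => rfl
  | cons a t ih =>
    simp only [List.foldl_cons, List.filter_cons, ih, PySem.Dict.getD_modify]
    by_cases h : key a = c
    · simp [h]
    · have h' : ¬ c = key a := fun hc => h hc.symm
      simp [h, h']

-- ---- A's per-tag seen-set loop produces the first-occurrence dedup ----

theorem dedup_loop (f : String → String) (F : List String) (s : PySem.Set String) :
    ((F.map (pvObj f)).foldl
        (fun (st : PySem.Set String × List (List (String × String))) o =>
          if PySem.Set.contains st.1 (pvGetS o "path") = true then st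
          else (PySem.Set.add st.1 (pvGetS o "path"), st.2 ++ [o]))
        (s, s.map (pvObj f))).2
      = (PySem.Set.update s F).map (pvObj f) := by
  induction F generalizing s with
  | nil => rfl
  | cons p t ih =>
    have hget : pvGetS (pvObj f p) "path" = p := rfl
    rw [List.map_cons, List.foldl_cons]
    have hupd : PySem.Set.update s (p :: t) = PySem.Set.update (PySem.Set.add s p) t := by
      unfold PySem.Set.update; rw [List.foldl_cons]
    by_cases h : PySem.Set.contains s p = true
    · have hadd : PySem.Set.add s p = s := by unfold PySem.Set.add; rw [if_pos h]
      rw [hget, if_pos h, hupd, hadd]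
      exact ih s
    · have hadd : PySem.Set.add s p = s ++ [p] := by unfold PySem.Set.add; rw [if_neg h]
      rw [hget, if_neg h, hupd]
      have hmap : s.map (pvObj f) ++ [pvObj f p] = (PySem.Set.add s p).map (pvObj f) := by
        rw [hadd, List.map_append]; rfl
      rw [hmap]
      exact ih (PySem.Set.add s p)

-- ---- representation of a dict built by repeated insert of a key-determined value ----

def pvPair {ν : Type} (f : String → ν) (p : String) : String × ν := (p, f p)

theorem contains_mk_map_pair {ν : Type} (f : String → ν) (s : List String) (p : String) :
    (PySem.Dict.mk (s.map (pvPair f))).contains p = PySem.Set.contains s p := by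
  induction s with
  | nil => rfl
  | cons k t ih =>
    simp only [PySem.Dict.contains, PySem.Set.contains] at ih ⊢
    simp only [List.map_cons, List.any_cons, ih, pvPair, List.contains_cons]
    rw [beq_str_comm]

theorem foldl_insert_fun_rep {ν : Type} (f : String → ν) (F : List String) (s : PySem.Set String) :
    F.foldl (fun d p => d.insert p (f p)) (PySem.Dict.mk (s.map (pvPair f)))
      = PySem.Dict.mk ((PySem.Set.update s F).map (pvPair f)) := by
  induction F generalizing s with
  | nil => rfl
  | cons p t ih =>
    have hstep : (PySem.Dict.mk (s.map (pvPair f))).insert p (f p)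
        = PySem.Dict.mk ((PySem.Set.add s p).map (pvPair f)) := by
      unfold PySem.Dict.insert PySem.Set.add
      rw [contains_mk_map_pair]
      by_cases h : PySem.Set.contains s p = true
      · rw [if_pos h, if_pos h]
        congr 1
        show (s.map (pvPair f)).map (fun q => if (q.1 == p) = true then (p, f p) else q) = _
        rw [List.map_map]
        apply List.map_congr_left
        intro k _
        by_cases hk : k = p
        · subst hk; simp [pvPair, Function.comp]
        · simp [pvPair, Function.comp, beq_eq_false_iff_ne.mpr hk]
      · rw [if_neg h, if_neg h]
        show PySem.Dict.mk (s.map (pvPair f) ++ [(p, f p)]) = _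
        simp [pvPair]
    rw [List.foldl_cons, hstep, ih]
    have : PySem.Set.update s (p :: t) = PySem.Set.update (PySem.Set.add s p) t := by
      unfold PySem.Set.update; rw [List.foldl_cons]
    rw [this]

theorem foldl_insert_const {α ν : Type} (key : α → String) (v : ν) (l : List α) (d : PySem.Dict String ν) :
    l.foldl (fun d r => d.insert (key r) v) d
      = (l.map key).foldl (fun d t => d.insert t v) d := by
  induction l generalizing d with
  | nil => rfl
  | cons a t ih => simp only [List.map_cons, List.foldl_cons, ih]

theorem getD_all_const {κ ν : Type} [BEq κ] (d : PySem.Dict κ ν) (k : κ) (v : ν)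
    (h : ∀ q ∈ d.items, q.2 = v) : d.getD k v = v := by
  unfold PySem.Dict.getD PySem.Dict.get?
  cases hf : d.items.find? (fun p => p.1 == k) with
  | none => rfl
  | some q => exact h q (List.mem_of_find?_eq_some hf)

-- ---- dict.contains through keys ----

theorem contains_eq_keys_any {κ ν : Type} [BEq κ] (d : PySem.Dict κ ν) (a : κ) :
    d.contains a = d.keys.any (fun x => x == a) := by
  unfold PySem.Dict.contains PySem.Dict.keys
  rw [List.any_map]
  rfl

theorem keys_insert_of_contains {κ ν : Type} [BEq κ] [LawfulBEq κ] (d : PySem.Dict κ ν) (k : κ) (v : ν)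
    (h : d.contains k = true) : (d.insert k v).keys = d.keys := by
  unfold PySem.Dict.insert
  rw [if_pos h]
  unfold PySem.Dict.keys
  rw [List.map_map]
  apply List.map_congr_left
  intro p _
  by_cases hp : p.1 = k
  · simp [Function.comp, hp]
  · simp [Function.comp, beq_eq_false_iff_ne.mpr hp]

theorem keys_modify_of_contains {κ ν : Type} [BEq κ] [LawfulBEq κ] (d : PySem.Dict κ ν) (k : κ) (d0 : ν) (f : ν → ν)
    (h : d.contains k = true) : (d.modify k d0 f).keys = d.keys :=
  keys_insert_of_contains d k _ h

-- ---- the per-fold trace of B's distributing loop, per tag ----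

def pvC (seen : PySem.Set (String × String)) (k : String) : List (String × String × String) → List (List (String × String))
  | [] => []
  | r :: t =>
    if PySem.Set.contains seen (r.1, r.2.1) = true then pvC seen k t
    else (if r.1 == k then [pvObjR r] else []) ++ pvC (PySem.Set.add seen (r.1, r.2.1)) k t

theorem pvC_cons (seen : PySem.Set (String × String)) (k : String) (r : String × String × String) (t : List (String × String × String)) :
    pvC seen k (r :: t)
      = if PySem.Set.contains seen (r.1, r.2.1) = true then pvC seen k t
        else (if r.1 == k then [pvObjR r] else []) ++ pvC (PySem.Set.add seen (r.1, r.2.1)) k t := rfl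

theorem B_fold (l : List (String × String × String)) (seen : PySem.Set (String × String))
    (d : PySem.Dict String (List (List (String × String)))) (k : String)
    (hd : ∀ r ∈ l, d.contains r.1 = true) :
    (l.foldl pvStep (seen, d)).2.keys = d.keys ∧
    (l.foldl pvStep (seen, d)).2.getD k [] = d.getD k [] ++ pvC seen k l := by
  induction l generalizing seen d with
  | nil => exact ⟨rfl, by simp [pvC]⟩
  | cons r t ih =>
    rw [List.foldl_cons]
    by_cases hc : PySem.Set.contains seen (r.1, r.2.1) = true
    · have hs : pvStep (seen, d) r = (seen, d) := by unfold pvStep; rw [if_pos hc]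
      rw [hs]
      obtain ⟨h1, h2⟩ := ih seen d (fun r' hr' => hd r' (List.mem_cons_of_mem _ hr'))
      exact ⟨h1, by rw [h2, pvC_cons, if_pos hc]⟩
    · have hrk : d.contains r.1 = true := hd r (List.mem_cons_self ..)
      have hs : pvStep (seen, d) r
          = (PySem.Set.add seen (r.1, r.2.1), d.modify r.1 [] (fun arr => arr ++ [pvObjR r])) := by
        unfold pvStep; rw [if_neg hc]
      rw [hs]
      have hkeys : (d.modify r.1 [] (fun arr => arr ++ [pvObjR r])).keys = d.keys :=
        keys_modify_of_contains d r.1 [] _ hrk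
      have hd' : ∀ r' ∈ t, (d.modify r.1 [] (fun arr => arr ++ [pvObjR r])).contains r'.1 = true := by
        intro r' hr'
        rw [contains_eq_keys_any, hkeys, ← contains_eq_keys_any]
        exact hd r' (List.mem_cons_of_mem _ hr')
      obtain ⟨h1, h2⟩ := ih (PySem.Set.add seen (r.1, r.2.1)) _ hd'
      refine ⟨by rw [h1, hkeys], ?_⟩
      rw [h2, PySem.Dict.getD_modify, pvC_cons, if_neg hc]
      by_cases hk : k = r.1
      · rw [if_pos hk, if_pos (show (r.1 == k) = true by simp [hk])]
        subst hk
        rw [List.append_assoc]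
      · rw [if_neg hk, if_neg (show ¬ ((r.1 == k) = true) by simp; exact fun he => hk he.symm),
          List.nil_append]

-- ---- restricting the trace to one tag ----

def pvD (s : List String) : List (String × String × String) → List (List (String × String))
  | [] => []
  | r :: t => if s.contains r.2.1 then pvD s t else pvObjR r :: pvD (s ++ [r.2.1]) t

def pvPaths (seen : List (String × String)) (k : String) : List String :=
  seen.filterMap (fun q => if q.1 == k then some q.2 else none)

theorem mem_pvPaths (seen : List (String × String)) (k p : String) :
    p ∈ pvPaths seen k ↔ (k, p) ∈ seen := by
  unfold pvPaths
  rw [List.mem_filterMap]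
  constructor
  · rintro ⟨q, hq, hqe⟩
    by_cases h : q.1 = k
    · have : q.2 = p := by simpa [h] using hqe
      have : q = (k, p) := Prod.ext h this
      rwa [this] at hq
    · simp [h] at hqe
  · intro h
    exact ⟨(k, p), h, by simp⟩

theorem contains_pvPaths (seen : List (String × String)) (k p : String) :
    (pvPaths seen k).contains p = PySem.Set.contains seen (k, p) := by
  rw [Bool.eq_iff_iff]
  unfold PySem.Set.contains
  rw [List.contains_iff_mem, List.contains_iff_mem]
  exact mem_pvPaths seen k p

theorem pvPaths_append (seen : List (String × String)) (x : String × String) (k : String) :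
    pvPaths (seen ++ [x]) k = pvPaths seen k ++ (if x.1 == k then [x.2] else []) := by
  unfold pvPaths
  rw [List.filterMap_append]
  congr 1
  by_cases h : x.1 = k <;> simp [h]

theorem pvD_cons (s : List String) (r : String × String × String) (t : List (String × String × String)) :
    pvD s (r :: t) = if s.contains r.2.1 then pvD s t else pvObjR r :: pvD (s ++ [r.2.1]) t := rfl

theorem pvC_filter (l : List (String × String × String)) (seen : PySem.Set (String × String)) (k : String) :
    pvC seen k l = pvD (pvPaths seen k) (l.filter (fun r => r.1 == k)) := by
  induction l generalizing seen with
  | nil => rfl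
  | cons r t ih =>
    rw [pvC_cons]
    by_cases htag : r.1 = k
    · have hf : (r :: t).filter (fun r => r.1 == k) = r :: t.filter (fun r => r.1 == k) := by
        simp [htag]
      rw [hf, pvD_cons]
      by_cases hc : PySem.Set.contains seen (r.1, r.2.1) = true
      · have hcp : (pvPaths seen k).contains r.2.1 = true := by
          rw [contains_pvPaths, ← htag]; exact hc
        rw [if_pos hc, if_pos hcp, ih seen]
      · have hcp : ¬ ((pvPaths seen k).contains r.2.1 = true) := by
          rw [contains_pvPaths, ← htag]; exact hc
        have hadd : PySem.Set.add seen (r.1, r.2.1) = seen ++ [(r.1, r.2.1)] := by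
          unfold PySem.Set.add; rw [if_neg hc]
        rw [if_neg hc, if_neg hcp, if_pos (show (r.1 == k) = true by simp [htag]), hadd, ih,
          pvPaths_append]
        simp [htag]
    · have hf : (r :: t).filter (fun r => r.1 == k) = t.filter (fun r => r.1 == k) := by
        simp [htag]
      rw [hf]
      by_cases hc : PySem.Set.contains seen (r.1, r.2.1) = true
      · rw [if_pos hc, ih seen]
      · have hadd : PySem.Set.add seen (r.1, r.2.1) = seen ++ [(r.1, r.2.1)] := by
          unfold PySem.Set.add; rw [if_neg hc]
        rw [if_neg hc, if_neg (show ¬ ((r.1 == k) = true) by simp [htag]), List.nil_append, hadd,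
          ih, pvPaths_append]
        simp [htag]

-- ---- the path-level first-occurrence selector ----

def pvNews (s : List String) : List String → List String
  | [] => []
  | p :: t => if s.contains p then pvNews s t else p :: pvNews (s ++ [p]) t

theorem pvNews_cons (s : List String) (p : String) (t : List String) :
    pvNews s (p :: t) = if s.contains p then pvNews s t else p :: pvNews (s ++ [p]) t := rfl

theorem mem_pvNews (P : List String) (s : List String) (q : String) :
    q ∈ pvNews s P ↔ q ∈ P ∧ q ∉ s := by
  induction P generalizing s with
  | nil => simp [pvNews]
  | cons p t ih =>
    rw [pvNews_cons]
    by_cases hc : s.contains p = true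
    · rw [if_pos hc, ih]
      have hps : p ∈ s := List.contains_iff_mem.mp hc
      constructor
      · exact fun ⟨h1, h2⟩ => ⟨List.mem_cons_of_mem _ h1, h2⟩
      · rintro ⟨h1, h2⟩
        rcases List.mem_cons.mp h1 with h | h
        · exact absurd (h ▸ hps) h2
        · exact ⟨h, h2⟩
    · rw [if_neg hc]
      have hps : p ∉ s := fun hm => hc (List.contains_iff_mem.mpr hm)
      constructor
      · intro hm
        rcases List.mem_cons.mp hm with h | h
        · exact ⟨h ▸ List.mem_cons_self .., h ▸ hps⟩
        · obtain ⟨h1, h2⟩ := (ih _).mp h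
          exact ⟨List.mem_cons_of_mem _ h1, fun hs => h2 (List.mem_append_left _ hs)⟩
      · rintro ⟨h1, h2⟩
        rcases List.mem_cons.mp h1 with h | h
        · exact h ▸ List.mem_cons_self ..
        · by_cases hqp : q = p
          · exact hqp ▸ List.mem_cons_self ..
          · exact List.mem_cons_of_mem _ ((ih _).mpr ⟨h, by
              intro hs
              rcases List.mem_append.mp hs with hs | hs
              · exact h2 hs
              · exact hqp (List.mem_singleton.mp hs)⟩)

theorem pvNews_nodup (P : List String) (s : List String) : (pvNews s P).Nodup := by
  induction P generalizing s with
  | nil => exact List.nodup_nil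
  | cons p t ih =>
    rw [pvNews_cons]
    by_cases hc : s.contains p = true
    · rw [if_pos hc]; exact ih s
    · rw [if_neg hc]
      refine List.Nodup.cons ?_ (ih _)
      intro hm
      have := ((mem_pvNews t _ p).mp hm).2
      exact this (List.mem_append_right _ (List.mem_singleton.mpr rfl))

theorem pvNews_sublist (P : List String) (s : List String) : (pvNews s P).Sublist P := by
  induction P generalizing s with
  | nil => exact List.Sublist.refl _
  | cons p t ih =>
    rw [pvNews_cons]
    by_cases hc : s.contains p = true
    · rw [if_pos hc]; exact (ih s).cons p
    · rw [if_neg hc]; exact (ih _).cons₂ p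

-- ---- keys for the sort order ----

def pvKr (r : String × String × String) : Lex (String × String) := toLex (PySem.Str.lower r.2.2, r.2.1)
def pvKp (f : String → String) (p : String) : Lex (String × String) := toLex (PySem.Str.lower (f p), p)
def pvKo (x : List (String × String)) : Lex (String × String) :=
  toLex (PySem.Str.lower (pvGetS x "title"), pvGetS x "path")

theorem pvKp_inj (f : String → String) {p q : String} (h : pvKp f p = pvKp f q) : p = q := by
  have := congrArg (fun x => (ofLex x).2) h
  simpa [pvKp] using this

theorem pvKo_obj (f : String → String) (p : String) : pvKo (pvObj f p) = pvKp f p := rfl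

theorem pvKr_shape (f : String → String) (r : String × String × String) (h : r.2.2 = f r.2.1) :
    pvKr r = pvKp f r.2.1 := by
  unfold pvKr pvKp
  rw [h]

-- sorted2 with two String keys is sorted with the lexicographic pair key
theorem sorted2_eq_sorted_lex {α : Type} (xs : List α) (k1 k2 : α → String) :
    PySem.List.sorted2 xs k1 k2
      = PySem.List.sorted xs (fun a => (toLex (k1 a, k2 a) : Lex (String × String))) := by
  have h : (fun (a b : α) => decide (k1 a < k1 b) || (!decide (k1 b < k1 a) && decide (k2 a < k2 b)))
      = fun (a b : α) => decide ((toLex (k1 a, k2 a) : Lex (String × String)) < toLex (k1 b, k2 b)) := by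
    funext a b
    by_cases h1 : k1 a < k1 b
    · simp [h1, not_lt.mpr (le_of_lt h1), Prod.Lex.lt_iff]
    · by_cases h2 : k1 b < k1 a
      · simp [h1, h2, Prod.Lex.lt_iff, ne_of_gt h2]
      · have he : k1 a = k1 b := le_antisymm (not_lt.mp h2) (not_lt.mp h1)
        simp [he, Prod.Lex.lt_iff]
  show xs.foldl (fun acc x => PySem.List.insertBy
      (fun a b => decide (k1 a < k1 b) || (!decide (k1 b < k1 a) && decide (k2 a < k2 b))) x acc) []
    = xs.foldl (fun acc x => PySem.List.insertBy
      (fun a b => decide ((toLex (k1 a, k2 a) : Lex (String × String)) < toLex (k1 b, k2 b))) x acc) []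
  rw [h]

theorem pvNews_pairwise (f : String → String) (P : List String) (s : List String)
    (h : P.Pairwise (fun p q => pvKp f p ≤ pvKp f q)) :
    (pvNews s P).Pairwise (fun p q => pvKp f p < pvKp f q) := by
  have hle : (pvNews s P).Pairwise (fun p q => pvKp f p ≤ pvKp f q) :=
    List.Pairwise.sublist (pvNews_sublist P s) h
  have hne : (pvNews s P).Pairwise (fun p q => p ≠ q) := pvNews_nodup P s
  exact (hle.and hne).imp (fun ⟨h1, h2⟩ => lt_of_le_of_ne h1 (fun he => h2 (pvKp_inj f he)))

theorem pvD_shape (f : String → String) (l : List (String × String × String)) (s : List String)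
    (h : ∀ r ∈ l, r.2.2 = f r.2.1) :
    pvD s l = (pvNews s (l.map (fun r => r.2.1))).map (pvObj f) := by
  induction l generalizing s with
  | nil => rfl
  | cons r t ih =>
    rw [pvD_cons, List.map_cons, pvNews_cons]
    by_cases hc : s.contains r.2.1 = true
    · rw [if_pos hc, if_pos hc, ih s (fun r' hr' => h r' (List.mem_cons_of_mem _ hr'))]
    · rw [if_neg hc, if_neg hc, List.map_cons,
        ih _ (fun r' hr' => h r' (List.mem_cons_of_mem _ hr'))]
      have : pvObjR r = pvObj f r.2.1 := by
        unfold pvObjR pvObj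
        rw [h r (List.mem_cons_self ..)]
      rw [this]

theorem dedup_loop_empty (f : String → String) (F : List String) :
    ((F.map (pvObj f)).foldl
        (fun (st : PySem.Set String × List (List (String × String))) o =>
          if PySem.Set.contains st.1 (pvGetS o "path") = true then st
          else (PySem.Set.add st.1 (pvGetS o "path"), st.2 ++ [o]))
        (PySem.Set.empty, [])).2
      = (PySem.Set.ofList F).map (pvObj f) := by
  have h := dedup_loop f F PySem.Set.empty
  simpa [PySem.Set.empty, PySem.Set.ofList, PySem.Set.update] using h

-- ---- the per-tag equality ----

theorem per_tag (f : String → String) (Q : List (String × String)) (k : String) :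
    PySem.List.sorted
        ((PySem.Set.ofList ((Q.filter (fun pt => pt.2 == k)).map (fun pt => pt.1))).map (pvObj f)) pvKo
      = pvD [] ((PySem.List.sorted (Q.map (fun pt => (pt.2, pt.1, f pt.1))) pvKr).filter
          (fun r => r.1 == k)) := by
  set g : String × String → String × String × String := fun pt => (pt.2, pt.1, f pt.1) with hg
  set flat := Q.map g with hflat
  set Lk := (PySem.List.sorted flat pvKr).filter (fun r => r.1 == k) with hLk
  set P := Lk.map (fun r => r.2.1) with hP
  set F := (Q.filter (fun pt => pt.2 == k)).map (fun pt => pt.1) with hF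
  have hshape : ∀ r ∈ Lk, r.2.2 = f r.2.1 := by
    intro r hr
    have hrf : r ∈ flat := (PySem.List.mem_sorted flat pvKr false r).mp (List.mem_of_mem_filter hr)
    obtain ⟨pt, _, hpt⟩ := List.mem_map.mp hrf
    rw [← hpt]
  rw [pvD_shape f Lk [] hshape, ← hP]
  -- P is a permutation of F
  have hPF : P.Perm F := by
    have h1 : Lk.Perm (flat.filter (fun r => r.1 == k)) :=
      (PySem.List.sorted_perm flat pvKr false).filter _
    have h2 : flat.filter (fun r => r.1 == k) = (Q.filter (fun pt => pt.2 == k)).map g := by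
      rw [hflat, List.filter_map]
      rfl
    have h3 : P.Perm ((flat.filter (fun r => r.1 == k)).map (fun r => r.2.1)) := h1.map _
    rw [h2, List.map_map] at h3
    exact h3
  apply PySem.List.sorted_eq_of_perm_of_pairwise_lt
  · -- permutation
    apply List.Perm.map
    rw [List.perm_ext_iff_of_nodup (pvNews_nodup P []) (PySem.Set.nodup_ofList F)]
    intro p
    rw [mem_pvNews, PySem.Set.mem_ofList, hPF.mem_iff]
    simp
  · -- strictly increasing key
    rw [List.pairwise_map]
    have h1 : (PySem.List.sorted flat pvKr).Pairwise (fun a b => pvKr a ≤ pvKr b) :=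
      PySem.List.sorted_pairwise flat pvKr
    have h2 : Lk.Pairwise (fun a b => pvKr a ≤ pvKr b) := h1.filter _
    have h3 : P.Pairwise (fun p q => pvKp f p ≤ pvKp f q) := by
      rw [hP, List.pairwise_map]
      exact h2.imp_of_mem (fun ha hb hab => by
        rw [← pvKr_shape f _ (hshape _ ha), ← pvKr_shape f _ (hshape _ hb)]; exact hab)
    exact (pvNews_pairwise f P [] h3).imp (fun h => by rwa [pvKo_obj, pvKo_obj])

-- ---- the whole-function core equality ----

theorem main_core (f : String → String) (Plist : List (String × List String)) :
    ((Plist.foldl (fun d pr => pr.2.foldl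
        (fun d t => d.modify t [] (fun arr => arr ++ [pvObj f pr.1])) d)
      PySem.Dict.empty).items.foldl
      (fun out tp =>
        out ++ [(tp.1,
          PySem.List.sorted2
            (tp.2.foldl
              (fun (st : PySem.Set String × List (List (String × String))) o =>
                if PySem.Set.contains st.1 (pvGetS o "path") = true then st
                else (PySem.Set.add st.1 (pvGetS o "path"), st.2 ++ [o]))
              (PySem.Set.empty, [])).2
            (fun x => PySem.Str.lower (pvGetS x "title")) (fun x => pvGetS x "path"))])
      [])
    = (let flat : List (String × String × String) :=
        Plist.foldl (fun fl pr => pr.2.foldl (fun fl t => fl ++ [(t, pr.1, f pr.1)]) fl) [];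
      ((PySem.List.sorted2 flat (fun r => PySem.Str.lower r.2.2) (fun r => r.2.1)).foldl
        pvStep (PySem.Set.empty, flat.foldl (fun d r => d.insert r.1 []) PySem.Dict.empty)).2.items) := by
  rw [foldl_nested_pairs (fun d path t => d.modify t ([] : List (List (String × String)))
    (fun arr => arr ++ [pvObj f path])) Plist PySem.Dict.empty]
  show _ = (((PySem.List.sorted2 (Plist.foldl (fun fl pr => pr.2.foldl
      (fun fl t => fl ++ [(t, pr.1, f pr.1)]) fl) []) _ _).foldl pvStep _).2.items)
  rw [foldl_nested_pairs (fun fl path t => fl ++ [(t, path, f path)]) Plist []]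
  generalize (Plist.flatMap (fun pr => pr.2.map (fun t => (pr.1, t)))) = Q
  rw [PySem.List.foldl_append_singleton_eq_map (fun pt : String × String => (pt.2, pt.1, f pt.1)) Q []]
  rw [List.nil_append]
  set g : String × String → String × String × String := fun pt => (pt.2, pt.1, f pt.1) with hg
  set flat := Q.map g with hflat
  set tags := Q.map (fun pt => pt.2) with htags
  have htagsflat : flat.map (fun r => r.1) = tags := by
    rw [hflat, List.map_map]; rfl
  -- A's dict
  have kA := PySem.Dict.keys_foldl_modify_key Q (fun pt => pt.2) ([] : List (List (String × String)))
      (fun _ pt arr => arr ++ [pvObj f pt.1]) PySem.Dict.empty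
  have nA := PySem.Dict.nodup_keys_foldl_modify_key Q (fun pt => pt.2) ([] : List (List (String × String)))
      (fun _ pt arr => arr ++ [pvObj f pt.1]) PySem.Dict.empty (by simp [PySem.Dict.empty, PySem.Dict.keys])
  rw [PySem.List.foldl_append_singleton_eq_map (fun tp : String × List (List (String × String)) =>
    (tp.1,
      PySem.List.sorted2
        ((tp.2.foldl
          (fun (st : PySem.Set String × List (List (String × String))) o =>
            if PySem.Set.contains st.1 (pvGetS o "path") = true then st
            else (PySem.Set.add st.1 (pvGetS o "path"), st.2 ++ [o]))
          (PySem.Set.empty, [])).2)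
        (fun x => PySem.Str.lower (pvGetS x "title")) (fun x => pvGetS x "path")))]
  rw [List.nil_append]
  rw [PySem.Dict.items_eq_map_keys _ nA ([] : List (List (String × String)))]
  rw [kA, List.map_map]
  -- B's dict
  rw [sorted2_eq_sorted_lex flat (fun r => PySem.Str.lower r.2.2) (fun r => r.2.1)]
  have hsortkey : (fun (a : String × String × String) => (toLex (PySem.Str.lower a.2.2, a.2.1) : Lex (String × String))) = pvKr := rfl
  rw [hsortkey]
  rw [foldl_insert_const (fun r : String × String × String => r.1) ([] : List (List (String × String))) flat PySem.Dict.empty]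
  rw [htagsflat]
  have hres0 : tags.foldl (fun d t => d.insert t []) PySem.Dict.empty
      = PySem.Dict.mk ((PySem.Set.ofList tags).map (pvPair (fun _ => ([] : List (List (String × String)))))) := by
    have := foldl_insert_fun_rep (fun _ => ([] : List (List (String × String)))) tags PySem.Set.empty
    simpa [PySem.Set.empty, PySem.Dict.empty, PySem.Set.update, PySem.Set.ofList] using this
  rw [hres0]
  set SF := PySem.List.sorted flat pvKr with hSF
  set res0 := PySem.Dict.mk ((PySem.Set.ofList tags).map (pvPair (fun _ => ([] : List (List (String × String)))))) with hres0d
  have hcont : ∀ r ∈ SF, res0.contains r.1 = true := by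
    intro r hr
    have hrf : r ∈ flat := (PySem.List.mem_sorted flat pvKr false r).mp hr
    have : r.1 ∈ tags := by
      rw [← htagsflat]
      exact List.mem_map_of_mem hrf
    rw [hres0d, contains_mk_map_pair]
    unfold PySem.Set.contains
    rw [List.contains_iff_mem]
    exact (PySem.Set.mem_ofList tags r.1).mpr this
  have hkeys0 : res0.keys = PySem.Set.ofList tags := by
    rw [hres0d]
    unfold PySem.Dict.keys
    show ((PySem.Set.ofList tags).map (pvPair fun _ => [])).map (fun x => x.1) = _
    rw [List.map_map]
    have hid : ((fun x : String × List (List (String × String)) => x.1)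
        ∘ pvPair (fun _ => ([] : List (List (String × String))))) = id := rfl
    rw [hid, List.map_id]
  obtain ⟨hK, _⟩ := B_fold SF PySem.Set.empty res0 "" hcont
  have hvals0 : ∀ q ∈ res0.items, q.2 = ([] : List (List (String × String))) := by
    intro q hq
    rw [hres0d] at hq
    obtain ⟨p, _, hp⟩ := List.mem_map.mp hq
    rw [← hp]
    rfl
  have nB : (SF.foldl pvStep (PySem.Set.empty, res0)).2.keys.Nodup := by
    rw [hK, hkeys0]
    exact PySem.Set.nodup_ofList tags
  rw [PySem.Dict.items_eq_map_keys _ nB ([] : List (List (String × String)))]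
  rw [hK, hkeys0]
  apply List.map_congr_left
  intro k hk
  simp only [Function.comp_apply]
  -- per-key values
  have hA : (Q.foldl (fun d pt => d.modify pt.2 [] (fun arr => arr ++ [pvObj f pt.1]))
        PySem.Dict.empty).getD k []
      = ((Q.filter (fun pt => pt.2 == k)).map (fun pt => pt.1)).map (pvObj f) := by
    rw [getD_foldl_modify_filter (fun pt => pt.2) (fun pt arr => arr ++ [pvObj f pt.1])
      ([] : List (List (String × String))) Q PySem.Dict.empty k]
    rw [PySem.List.foldl_append_singleton_eq_map (fun pt : String × String => pvObj f pt.1)]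
    rw [PySem.Dict.getD_empty, List.nil_append, List.map_map]
    rfl
  obtain ⟨_, hV⟩ := B_fold SF PySem.Set.empty res0 k hcont
  have hres0k : res0.getD k [] = [] := getD_all_const res0 k [] hvals0
  rw [hV, hres0k, List.nil_append]
  rw [pvC_filter SF PySem.Set.empty k]
  have hpe : pvPaths PySem.Set.empty k = [] := rfl
  rw [hpe, hA]
  congr 1
  rw [dedup_loop_empty f ((Q.filter (fun pt => pt.2 == k)).map (fun pt => pt.1)),
    sorted2_eq_sorted_lex]
  exact per_tag f Q k

-- ===== VERDICT (by name: the statement is the Claim_ definition above) =====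
theorem build_pages_by_tag_spec : Claim_equal_build_pages_by_tag := by
  intro tags_by_page pages_meta _ _
  unfold Spec_build_pages_by_tag build_pages_by_tag build_pages_by_tag_alt
  exact main_core (pvTitle pages_meta) ((PySem.Dict.ofList tags_by_page).items)
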